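-- pv_equiv track=rewrite | github.com/mo9mo9-uwu-mo9mo9/Kumihan-Formatter | kumihan_formatter/core/optimization/settings/analyzers.py | _analyze_nesting
-- ===== SOURCE A (Python) =====
-- def _analyze_nesting(content: str) -> int:
--     """ネスト深度を分析"""
--     max_depth = 0
--     current_depth = 0
--
--     for char in content:
--         if char == "#":
--             current_depth += 1
--             max_depth = max(max_depth, current_depth)
--         elif char == "\n":
--             current_depth = 0
--
--     return max_depth
-- ===== SOURCE B (Python) =====
-- def _analyze_nesting(content: str) -> int:
--     """Max count of '#' characters on any single line (split lines, count per line)."""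
--     return max((line.count("#") for line in content.split("\n")), default=0)
-- ===== Notes on version B (the rewrite author's own statement) =====
-- stated objective: simpler
-- what changed: Replaces A's char-by-char state machine (running depth reset on newline, running max) with a one-line split-into-lines / count-per-line / max decomposition.
import Mathlib
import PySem

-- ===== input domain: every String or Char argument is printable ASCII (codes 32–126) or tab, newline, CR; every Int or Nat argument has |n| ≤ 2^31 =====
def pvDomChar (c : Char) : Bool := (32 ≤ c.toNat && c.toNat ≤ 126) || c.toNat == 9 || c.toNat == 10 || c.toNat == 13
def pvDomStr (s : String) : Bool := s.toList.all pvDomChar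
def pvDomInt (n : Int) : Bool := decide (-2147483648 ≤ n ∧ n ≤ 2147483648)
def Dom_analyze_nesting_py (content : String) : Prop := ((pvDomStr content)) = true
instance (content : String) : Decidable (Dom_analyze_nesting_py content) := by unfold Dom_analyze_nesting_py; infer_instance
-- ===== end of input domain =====

-- B replaces A's char-by-char state machine with split-into-lines / count-per-line / max (objective: simpler).

-- ===== PORT A =====
-- char-by-char loop: current depth of '#' since the last newline, running maximum
def analyze_nesting_py (content : String) : Int :=
  (content.toList.foldl
    (fun (st : Int × Int) char =>
      if char == '#' then (max st.1 (st.2 + 1), st.2 + 1)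
      else if char == '\n' then (st.1, 0)
      else st)
    (0, 0)).1

-- ===== PORT B =====
-- content.split("\n"), each line's '#' count, max of those (default 0; split is never
-- empty and counts are ≥ 0, so a fold of max starting at 0 is Python's max(..., default=0))
def analyze_nesting_py_alt (content : String) : Int :=
  (((PySem.Chars.splitOn content.toList "\n".toList).map
      (fun line => (PySem.Chars.count line "#".toList : Int))).foldl max 0)

-- ===== PRECONDITION & SPEC =====
def Spec_analyze_nesting_py (content : String) (out : Int) : Prop := out = analyze_nesting_py_alt content
instance (content : String) (out : Int) : Decidable (Spec_analyze_nesting_py content out) := by unfold Spec_analyze_nesting_py; infer_instance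

-- ===== CLAIM (what is proved, stated in full; the proofs are below) =====
def Claim_equal_analyze_nesting_py : Prop := ∀ (content : String), Dom_analyze_nesting_py content → Spec_analyze_nesting_py content (analyze_nesting_py content)

-- ===== LEMMAS AND PROOFS =====

-- proof-side: split a char list at newlines, accumulating the (reversed) current line
def pvLines : List Char → List Char → List (List Char)
  | [], cur => [cur.reverse]
  | '\n' :: t, cur => cur.reverse :: pvLines t []
  | c :: t, cur => pvLines t (c :: cur)

-- proof-side: max over (cd + '#'-count of first line) and the '#'-counts of later lines
def pvLinesMax : List Char → Int → Int
  | [], cd => cd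
  | '\n' :: t, cd => max cd (pvLinesMax t 0)
  | c :: t, cd => pvLinesMax t (if c = '#' then cd + 1 else cd)

theorem pvLinesMax_ge (cs : List Char) (cd : Int) : cd ≤ pvLinesMax cs cd := by
  induction cs generalizing cd with
  | nil => simp [pvLinesMax]
  | cons c t ih =>
    by_cases h : c = '\n'
    · subst h; simp only [pvLinesMax]; exact le_max_left _ _
    · rw [show pvLinesMax (c :: t) cd = pvLinesMax t (if c = '#' then cd + 1 else cd) by
        cases c <;> simp_all [pvLinesMax]]
      split_ifs with h2
      · exact le_trans (by omega) (ih (cd + 1))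
      · exact ih cd

theorem count_go_eq (c : Char) (fuel : Nat) (l : List Char) (acc : Nat)
    (h : l.length ≤ fuel) :
    PySem.Chars.count.go [c] fuel l acc = acc + l.count c := by
  induction fuel generalizing l acc with
  | zero =>
    cases l with
    | nil => simp [PySem.Chars.count.go]
    | cons a t => simp at h
  | succ n ih =>
    cases l with
    | nil => simp [PySem.Chars.count.go]
    | cons a t =>
      simp only [PySem.Chars.count.go, List.isPrefixOf, List.length_cons] at *
      by_cases hc : a = c
      · subst hc
        simp only [BEq.rfl, Bool.true_and, if_true, List.drop_succ_cons,
          List.length_nil, List.drop_zero]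
        rw [ih t (acc + 1) (by omega)]
        simp [List.count_cons]
        omega
      · have : (c == a) = false := by simp [BEq.comm]; exact fun h' => hc h'.symm
        simp only [this, Bool.false_and, if_false]
        rw [ih t acc (by omega)]
        simp [List.count_cons, hc]

theorem count_single (c : Char) (l : List Char) :
    PySem.Chars.count l [c] = l.count c := by
  simp only [PySem.Chars.count, List.isEmpty_cons, reduceIte]
  simpa using count_go_eq c l.length l 0 (le_refl _)

theorem splitOn_go_eq (fuel : Nat) (l cur : List Char) (acc : List (List Char))
    (h : l.length < fuel) :
    PySem.Chars.splitOn.go ['\n'] fuel l cur acc = acc.reverse ++ pvLines l cur := by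
  induction fuel generalizing l cur acc with
  | zero => omega
  | succ n ih =>
    cases l with
    | nil => simp [PySem.Chars.splitOn.go, pvLines]
    | cons a t =>
      simp only [List.length_cons] at h
      by_cases ha : a = '\n'
      · subst ha
        have hp : List.isPrefixOf ['\n'] ('\n' :: t) = true := by simp [List.isPrefixOf]
        simp only [PySem.Chars.splitOn.go, hp, if_true, List.length_singleton,
          List.drop_succ_cons, List.drop_zero]
        rw [ih t [] (cur.reverse :: acc) (by omega)]
        simp [pvLines]
      · have hp : List.isPrefixOf ['\n'] (a :: t) = false := by
          simp [List.isPrefixOf]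
          exact fun h' => ha h'.symm
        simp only [PySem.Chars.splitOn.go, hp, if_false]
        rw [ih t (a :: cur) acc (by omega)]
        congr 1
        cases a <;> simp_all [pvLines]

theorem splitOn_eq (l : List Char) :
    PySem.Chars.splitOn l "\n".toList = pvLines l [] := by
  have : "\n".toList = ['\n'] := rfl
  rw [this, PySem.Chars.splitOn, splitOn_go_eq (l.length + 1) l [] [] (by omega)]
  simp

theorem foldl_max_lines (cs cur : List Char) (m : Int) :
    ((pvLines cs cur).map (fun line => (line.count '#' : Int))).foldl max m
      = max m (pvLinesMax cs (cur.count '#' : Nat)) := by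
  induction cs generalizing cur m with
  | nil => simp [pvLines, pvLinesMax, List.foldl]
  | cons c t ih =>
    by_cases hn : c = '\n'
    · subst hn
      simp only [pvLines, pvLinesMax, List.map_cons, List.foldl_cons]
      rw [ih [] (max m (cur.reverse.count '#' : Nat))]
      simp [max_assoc]
    · rw [show pvLines (c :: t) cur = pvLines t (c :: cur) by
        cases c <;> simp_all [pvLines]]
      rw [ih (c :: cur) m]
      congr 1
      by_cases hc : c = '#'
      · subst hc
        rw [show pvLinesMax ('#' :: t) ((cur.count '#' : Nat) : Int)
              = pvLinesMax t (((cur.count '#' : Nat) : Int) + 1) by simp [pvLinesMax]]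
        congr 1
        rw [List.count_cons_self]
        push_cast
        ring
      · rw [show pvLinesMax (c :: t) ((cur.count '#' : Nat) : Int)
              = pvLinesMax t ((cur.count '#' : Nat) : Int) by
            cases c <;> simp_all [pvLinesMax]]
        congr 2
        simp [List.count_cons, hc]

theorem foldA_eq (cs : List Char) (md cd : Int) (h0 : 0 ≤ cd) (h1 : cd ≤ md) :
    (cs.foldl
      (fun (st : Int × Int) char =>
        if char == '#' then (max st.1 (st.2 + 1), st.2 + 1)
        else if char == '\n' then (st.1, 0)
        else st)
      (md, cd)).1 = max md (pvLinesMax cs cd) := by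
  induction cs generalizing md cd with
  | nil => simp [pvLinesMax, max_eq_left h1]
  | cons c t ih =>
    by_cases hc : c = '#'
    · subst hc
      simp only [List.foldl_cons, BEq.rfl, if_true]
      rw [ih (max md (cd + 1)) (cd + 1) (by omega) (le_max_right _ _)]
      rw [show pvLinesMax ('#' :: t) cd = pvLinesMax t (cd + 1) by simp [pvLinesMax]]
      rw [max_assoc, max_eq_right (pvLinesMax_ge t (cd + 1))]
    · by_cases hn : c = '\n'
      · subst hn
        simp only [List.foldl_cons, show (('\n' == '#') = false) by decide, BEq.rfl, if_true, Bool.false_eq_true, if_false]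
        rw [ih md 0 (le_refl _) (by omega)]
        rw [show pvLinesMax ('\n' :: t) cd = max cd (pvLinesMax t 0) by simp [pvLinesMax]]
        rw [← max_assoc, max_eq_left h1]
      · have hc' : (c == '#') = false := by simp [hc]
        have hn' : (c == '\n') = false := by simp [hn]
        simp only [List.foldl_cons, hc', hn', Bool.false_eq_true, if_false]
        rw [ih md cd h0 h1]
        congr 1
        rw [show pvLinesMax (c :: t) cd = pvLinesMax t (if c = '#' then cd + 1 else cd) by
          cases c <;> simp_all [pvLinesMax]]
        simp [hc]

-- ===== VERDICT (by name: the statement is the Claim_ definition above) =====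
theorem analyze_nesting_py_spec : Claim_equal_analyze_nesting_py := by
  intro content _
  unfold Spec_analyze_nesting_py analyze_nesting_py analyze_nesting_py_alt
  rw [splitOn_eq]
  have hB : ((pvLines content.toList []).map (fun line => (PySem.Chars.count line "#".toList : Int))).foldl max 0
      = ((pvLines content.toList []).map (fun line => (line.count '#' : Int))).foldl max 0 := by
    congr 1
    apply List.map_congr_left
    intro l _
    rw [show "#".toList = ['#'] from rfl, count_single]
  rw [hB, foldl_max_lines]
  rw [foldA_eq content.toList 0 0 (le_refl _) (le_refl _)]
  simp
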